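-- pv_equiv track=rewrite | github.com/sailfish-team/sailfish | sailfish/sym.py | use_vectors
-- ===== SOURCE A (Python) =====
-- def use_vectors(str):
--     ret = str.replace('vx', 'v0[0]').replace('vy', 'v0[1]').replace('vz', 'v0[2]')
--     ret = ret.replace('g1eax', 'ea1[0]').replace('g1eay', 'ea1[1]').replace('g1eaz', 'ea1[2]')
--     ret = ret.replace('eax', 'ea0[0]').replace('eay', 'ea0[1]').replace('eaz', 'ea0[2]')
--
--     for dist in range(0, 9):
--         ret = ret.replace('g%sd1m0x' % dist, 'grad%s[0]' % dist)
--         ret = ret.replace('g%sd1m0y' % dist, 'grad%s[1]' % dist)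
--         ret = ret.replace('g%sd1m0z' % dist, 'grad%s[2]' % dist)
--
--     return ret
-- ===== SOURCE B (Python) =====
-- def use_vectors(str):
--     # one table of every source token -> replacement, then a single left-to-right scan
--     table = {'vx': 'v0[0]', 'vy': 'v0[1]', 'vz': 'v0[2]',
--              'g1eax': 'ea1[0]', 'g1eay': 'ea1[1]', 'g1eaz': 'ea1[2]',
--              'eax': 'ea0[0]', 'eay': 'ea0[1]', 'eaz': 'ea0[2]'}
--     for dist in range(0, 9):
--         for i, c in enumerate('xyz'):
--             table['g%sd1m0%s' % (dist, c)] = 'grad%s[%s]' % (dist, i)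
--     out = []
--     s = str
--     while s:
--         for L in (7, 5, 3, 2):
--             rep = table.get(s[:L])
--             if rep is not None:
--                 out.append(rep)
--                 s = s[L:]
--                 break
--         else:
--             out.append(s[0])
--             s = s[1:]
--     return ''.join(out)
-- ===== Notes on version B (the rewrite author's own statement) =====
-- stated objective: alternative
-- what changed: Replaces the chain of 36 sequential str.replace passes by one token table (the 9 literal entries plus the 27 loop-generated grad entries) and a single left-to-right scan that at each position tries the four token lengths 7/5/3/2 and emits the table entry or the character.
import Mathlib
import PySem

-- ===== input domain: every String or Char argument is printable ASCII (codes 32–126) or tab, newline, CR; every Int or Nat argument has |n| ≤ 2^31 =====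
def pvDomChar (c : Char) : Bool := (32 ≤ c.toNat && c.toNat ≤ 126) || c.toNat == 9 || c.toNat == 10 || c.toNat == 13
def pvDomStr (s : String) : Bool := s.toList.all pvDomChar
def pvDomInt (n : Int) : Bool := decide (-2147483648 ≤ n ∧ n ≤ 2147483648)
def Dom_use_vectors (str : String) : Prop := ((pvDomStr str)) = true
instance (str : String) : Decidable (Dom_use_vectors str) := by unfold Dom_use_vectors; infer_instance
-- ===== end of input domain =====

-- ===== PORT A =====
-- B replaces A's 36 sequential str.replace passes by one token table and a single left-to-right scan (alternative decomposition, return value only; not claimed faster).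
-- 'g%sd1m0x' % dist  (string formatting, exact for the int dist)
def pvFmtA (pre : List Char) (dist : Int) (suf : List Char) : String :=
  String.ofList (pre ++ PySem.Int.toChars dist ++ suf)

def use_vectors (str : String) : String :=
  let ret := PySem.Str.replace (PySem.Str.replace (PySem.Str.replace str "vx" "v0[0]") "vy" "v0[1]") "vz" "v0[2]"
  let ret := PySem.Str.replace (PySem.Str.replace (PySem.Str.replace ret "g1eax" "ea1[0]") "g1eay" "ea1[1]") "g1eaz" "ea1[2]"
  let ret := PySem.Str.replace (PySem.Str.replace (PySem.Str.replace ret "eax" "ea0[0]") "eay" "ea0[1]") "eaz" "ea0[2]"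
  let ret := (PySem.List.pyRange 0 9 1).foldl (fun r dist =>
      PySem.Str.replace (PySem.Str.replace (PySem.Str.replace r
        (pvFmtA "g".toList dist "d1m0x".toList) (pvFmtA "grad".toList dist "[0]".toList))
        (pvFmtA "g".toList dist "d1m0y".toList) (pvFmtA "grad".toList dist "[1]".toList))
        (pvFmtA "g".toList dist "d1m0z".toList) (pvFmtA "grad".toList dist "[2]".toList)) ret
  ret

-- ===== PORT B =====
-- the token table of Source B: 9 literal entries, then the 27 loop-generated grad entries
def pvTable : PySem.Dict String String :=
  let t : PySem.Dict String String := ⟨[("vx", "v0[0]"), ("vy", "v0[1]"), ("vz", "v0[2]"),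
      ("g1eax", "ea1[0]"), ("g1eay", "ea1[1]"), ("g1eaz", "ea1[2]"),
      ("eax", "ea0[0]"), ("eay", "ea0[1]"), ("eaz", "ea0[2]")]⟩
  (PySem.List.pyRange 0 9 1).foldl (fun t dist =>
    (PySem.List.enumerate "xyz".toList).foldl (fun t ic =>
      t.insert (String.ofList ("g".toList ++ PySem.Int.toChars dist ++ "d1m0".toList ++ [ic.2]))
               (String.ofList ("grad".toList ++ PySem.Int.toChars dist ++ "[".toList ++ PySem.Int.toChars ic.1 ++ "]".toList))) t) t

-- the for-L-in-(7,5,3,2) loop body of Source B: the first token length whose front slice hits the table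
def pvHit (s : List Char) : Option (String × Nat) :=
  ((pvTable.get? (String.ofList (s.take 7))).map (fun rep => (rep, 7))).orElse (fun _ =>
  ((pvTable.get? (String.ofList (s.take 5))).map (fun rep => (rep, 5))).orElse (fun _ =>
  ((pvTable.get? (String.ofList (s.take 3))).map (fun rep => (rep, 3))).orElse (fun _ =>
  (pvTable.get? (String.ofList (s.take 2))).map (fun rep => (rep, 2)))))

-- the while loop of Source B: emit the table entry and advance by its token length, else emit one char
-- and advance by 1.  The fuel argument only makes the loop total; called with fuel = length, enough
-- for every iteration.
def pvScan : Nat → List Char → List String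
  | _, [] => []
  | 0, _ :: _ => []
  | fuel+1, c :: t =>
    let rl := (pvHit (c :: t)).getD (String.ofList ((c :: t).take 1), 1)
    rl.1 :: pvScan fuel ((c :: t).drop rl.2)

def use_vectors_alt (str : String) : String :=
  PySem.Str.join "" (pvScan str.toList.length str.toList)

-- ===== PRECONDITION & SPEC =====
def Spec_use_vectors (str : String) (out : String) : Prop := out = use_vectors_alt str
instance (str : String) (out : String) : Decidable (Spec_use_vectors str out) := by unfold Spec_use_vectors; infer_instance

-- ===== CLAIM (what is proved, stated in full; the proofs are below) =====
def Claim_equal_use_vectors : Prop := ∀ (str : String), Dom_use_vectors str → Spec_use_vectors str (use_vectors str)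

-- ===== LEMMAS AND PROOFS =====

def pvRepl (old new : List Char) : Nat → List Char → List Char
  | 0, l => l
  | _+1, [] => []
  | fuel+1, c :: t =>
    if old.isPrefixOf (c :: t) then new ++ pvRepl old new fuel ((c :: t).drop old.length)
    else c :: pvRepl old new fuel t

lemma pvRepl_go (old new : List Char) :
    ∀ (fuel : Nat) (l acc : List Char),
      PySem.Chars.replace.go old new fuel l acc = acc.reverse ++ pvRepl old new fuel l := by
  intro fuel
  induction fuel with
  | zero => intro l acc; simp [PySem.Chars.replace.go, pvRepl]
  | succ f ih =>
    intro l acc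
    cases l with
    | nil => simp [PySem.Chars.replace.go, pvRepl]
    | cons c t =>
      simp only [PySem.Chars.replace.go, pvRepl]
      by_cases h : old.isPrefixOf (c :: t)
      · simp [h, ih]
      · simp [h, ih]

lemma pvRepl_fuel (old new : List Char) (hne : old ≠ []) :
    ∀ (n : Nat) (l : List Char) (f : Nat), l.length ≤ n → l.length ≤ f →
      pvRepl old new f l = pvRepl old new l.length l := by
  have hop : 0 < old.length := List.length_pos_iff.mpr hne
  intro n
  induction n with
  | zero =>
    intro l f h1 _
    have : l = [] := List.eq_nil_of_length_eq_zero (Nat.le_zero.mp h1)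
    subst this
    cases f <;> simp [pvRepl]
  | succ n ih =>
    intro l f h1 h2
    cases l with
    | nil => cases f <;> simp [pvRepl]
    | cons c t =>
      simp only [List.length_cons] at h1 h2
      obtain ⟨f', rfl⟩ : ∃ f', f = f' + 1 := ⟨f - 1, by omega⟩
      conv_rhs => rw [List.length_cons]
      simp only [pvRepl]
      by_cases h : old.isPrefixOf (c :: t)
      · have hd : ((c :: t).drop old.length).length = t.length + 1 - old.length := by
          simp [List.length_drop]
        have hd : ((c :: t).drop old.length).length = t.length + 1 - old.length := by
          simp [List.length_drop]
        simp only [h, if_true]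
        rw [ih _ f' (by omega) (by omega), ih _ t.length (by omega) (by omega)]
      · simp only [h, if_false, Bool.false_eq_true]
        rw [ih t f' (by omega) (by omega), ih t t.length (by omega) le_rfl]

def pvR (old new l : List Char) : List Char := pvRepl old new l.length l

lemma replace_eq_pvR (s old new : List Char) (h : old.isEmpty = false) :
    PySem.Chars.replace s old new = pvR old new s := by
  show _ = pvRepl old new s.length s
  rw [PySem.Chars.replace.eq_def, h]
  simp [pvRepl_go]

lemma pvR_nil (old new : List Char) : pvR old new [] = [] := rfl

lemma pvR_cons_neg (old new : List Char) (c : Char) (t : List Char) (h : ¬ old <+: c :: t) :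
    pvR old new (c :: t) = c :: pvR old new t := by
  have h' : old.isPrefixOf (c :: t) = false := by
    rw [← Bool.not_eq_true, List.isPrefixOf_iff_prefix]; exact h
  simp [pvR, pvRepl, h']

lemma pvR_pos (old new l : List Char) (hne : old ≠ []) (h : old <+: l) :
    pvR old new l = new ++ pvR old new (l.drop old.length) := by
  have hop : 0 < old.length := List.length_pos_iff.mpr hne
  cases l with
  | nil =>
    exfalso
    have := List.eq_nil_of_prefix_nil h
    exact hne this
  | cons c t =>
    have h' : old.isPrefixOf (c :: t) = true := List.isPrefixOf_iff_prefix.mpr h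
    simp only [pvR, List.length_cons, pvRepl, h', if_true]
    congr 1
    exact pvRepl_fuel old new hne t.length _ t.length (by simp [List.length_drop]; omega)
      (by simp [List.length_drop]; omega)

def pvNoOccB (p x : List Char) : Bool :=
  (List.range x.length).all (fun k => !(p.isPrefixOf (x.drop k)) && !((x.drop k).isPrefixOf p))

lemma prefix_append_or (p a w : List Char) (h : p <+: a ++ w) : p <+: a ∨ a <+: p := by
  rcases List.prefix_or_prefix_of_prefix h (List.prefix_append a w) with h1 | h1
  · left; exact h1
  · right; exact h1

lemma pvNoOccB_cons (c : Char) (x : List Char) (pp : List Char)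
    (h : pvNoOccB pp (c :: x) = true) : pvNoOccB pp x = true := by
  simp only [pvNoOccB, List.all_eq_true, List.mem_range] at h ⊢
  intro k hk
  have := h (k + 1) (by simp; omega)
  simpa using this

lemma pvR_append (p q : List Char) :
    ∀ (x w : List Char), pvNoOccB p x = true → pvR p q (x ++ w) = x ++ pvR p q w := by
  intro x
  induction x with
  | nil => intro w _; simp
  | cons c x' ih =>
    intro w h
    have h0 := (List.all_eq_true.mp h) 0 (by simp)
    simp only [List.drop_zero, Bool.and_eq_true, Bool.not_eq_true'] at h0
    have hnp : ¬ p <+: (c :: x') ++ w := by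
      intro hpre
      rcases prefix_append_or p (c :: x') w hpre with h1 | h1
      · rw [← List.isPrefixOf_iff_prefix] at h1
        simp [h1] at h0
      · rw [← List.isPrefixOf_iff_prefix] at h1
        simp [h1] at h0
    have hnp' : ¬ p <+: c :: (x' ++ w) := by simpa using hnp
    show pvR p q (c :: (x' ++ w)) = c :: x' ++ pvR p q w
    rw [pvR_cons_neg _ _ _ _ hnp', ih w (pvNoOccB_cons c x' p h)]
    simp

def pvClosed (S : List (List Char)) : Bool :=
  S.all (fun σ => !σ.isEmpty && (σ.length == 1 || S.contains σ.tail))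

def pvAvoid (S : List (List Char)) (q : List Char) : Bool :=
  S.all (fun σ => !(σ.isPrefixOf q) && !(q.isPrefixOf σ))

lemma pvTnc (S : List (List Char)) (p q : List Char) (hpe : p ≠ [])
    (hC : pvClosed S = true) (hA : pvAvoid S q = true) :
    ∀ (n : Nat) (u : List Char), u.length ≤ n → ∀ σ ∈ S, σ <+: pvR p q u → σ <+: u := by
  intro n
  induction n with
  | zero =>
    intro u hu σ hσ hpre
    have : u = [] := List.eq_nil_of_length_eq_zero (Nat.le_zero.mp hu)
    subst this
    simpa [pvR, pvRepl] using hpre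
  | succ n ih =>
    intro u hu σ hσ hpre
    have hσne : σ ≠ [] := by
      have := (List.all_eq_true.mp hC) σ hσ
      simp only [Bool.and_eq_true, Bool.not_eq_true', List.isEmpty_eq_false_iff] at this
      exact this.1
    cases u with
    | nil => simpa [pvR, pvRepl] using hpre
    | cons c t =>
      by_cases hp : p <+: c :: t
      · rw [pvR_pos p q _ hpe hp] at hpre
        exfalso
        have hAq := (List.all_eq_true.mp hA) σ hσ
        simp only [Bool.and_eq_true, Bool.not_eq_true'] at hAq
        rcases prefix_append_or σ q _ hpre with h1 | h1
        · rw [← List.isPrefixOf_iff_prefix] at h1; simp [h1] at hAq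
        · rw [← List.isPrefixOf_iff_prefix] at h1; simp [h1] at hAq
      · rw [pvR_cons_neg _ _ _ _ hp] at hpre
        rcases List.prefix_cons_iff.mp hpre with h1 | ⟨σ', rfl, hσ'⟩
        · exact absurd h1 hσne
        · by_cases hσ'e : σ' = []
          · subst hσ'e; exact List.prefix_cons_iff.mpr (Or.inr ⟨[], rfl, List.nil_prefix⟩)
          · have hcl := (List.all_eq_true.mp hC) _ hσ
            simp only [Bool.and_eq_true, Bool.or_eq_true, beq_iff_eq] at hcl
            have hmem : σ' ∈ S := by
              rcases hcl.2 with h2 | h2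
              · exfalso; simp at h2; exact hσ'e (by simpa using h2)
              · simpa using List.contains_iff_mem.mp (by simpa using h2)
            have := ih t (by simpa using Nat.lt_succ_iff.mp (by simpa using hu)) σ' hmem hσ'
            exact List.cons_prefix_cons.mpr ⟨rfl, this⟩

-- the replacement chain, char level
def pvChain (L : List (List Char × List Char)) (s : List Char) : List Char :=
  L.foldl (fun acc pq => pvR pq.1 pq.2 acc) s

def pvTBL : List (List Char × List Char) := [("vx".toList, "v0[0]".toList),
  ("vy".toList, "v0[1]".toList),
  ("vz".toList, "v0[2]".toList),
  ("g1eax".toList, "ea1[0]".toList),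
  ("g1eay".toList, "ea1[1]".toList),
  ("g1eaz".toList, "ea1[2]".toList),
  ("eax".toList, "ea0[0]".toList),
  ("eay".toList, "ea0[1]".toList),
  ("eaz".toList, "ea0[2]".toList),
  ("g".toList ++ PySem.Int.toChars 0 ++ "d1m0x".toList, "grad".toList ++ PySem.Int.toChars 0 ++ "[0]".toList),
  ("g".toList ++ PySem.Int.toChars 0 ++ "d1m0y".toList, "grad".toList ++ PySem.Int.toChars 0 ++ "[1]".toList),
  ("g".toList ++ PySem.Int.toChars 0 ++ "d1m0z".toList, "grad".toList ++ PySem.Int.toChars 0 ++ "[2]".toList),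
  ("g".toList ++ PySem.Int.toChars 1 ++ "d1m0x".toList, "grad".toList ++ PySem.Int.toChars 1 ++ "[0]".toList),
  ("g".toList ++ PySem.Int.toChars 1 ++ "d1m0y".toList, "grad".toList ++ PySem.Int.toChars 1 ++ "[1]".toList),
  ("g".toList ++ PySem.Int.toChars 1 ++ "d1m0z".toList, "grad".toList ++ PySem.Int.toChars 1 ++ "[2]".toList),
  ("g".toList ++ PySem.Int.toChars 2 ++ "d1m0x".toList, "grad".toList ++ PySem.Int.toChars 2 ++ "[0]".toList),
  ("g".toList ++ PySem.Int.toChars 2 ++ "d1m0y".toList, "grad".toList ++ PySem.Int.toChars 2 ++ "[1]".toList),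
  ("g".toList ++ PySem.Int.toChars 2 ++ "d1m0z".toList, "grad".toList ++ PySem.Int.toChars 2 ++ "[2]".toList),
  ("g".toList ++ PySem.Int.toChars 3 ++ "d1m0x".toList, "grad".toList ++ PySem.Int.toChars 3 ++ "[0]".toList),
  ("g".toList ++ PySem.Int.toChars 3 ++ "d1m0y".toList, "grad".toList ++ PySem.Int.toChars 3 ++ "[1]".toList),
  ("g".toList ++ PySem.Int.toChars 3 ++ "d1m0z".toList, "grad".toList ++ PySem.Int.toChars 3 ++ "[2]".toList),
  ("g".toList ++ PySem.Int.toChars 4 ++ "d1m0x".toList, "grad".toList ++ PySem.Int.toChars 4 ++ "[0]".toList),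
  ("g".toList ++ PySem.Int.toChars 4 ++ "d1m0y".toList, "grad".toList ++ PySem.Int.toChars 4 ++ "[1]".toList),
  ("g".toList ++ PySem.Int.toChars 4 ++ "d1m0z".toList, "grad".toList ++ PySem.Int.toChars 4 ++ "[2]".toList),
  ("g".toList ++ PySem.Int.toChars 5 ++ "d1m0x".toList, "grad".toList ++ PySem.Int.toChars 5 ++ "[0]".toList),
  ("g".toList ++ PySem.Int.toChars 5 ++ "d1m0y".toList, "grad".toList ++ PySem.Int.toChars 5 ++ "[1]".toList),
  ("g".toList ++ PySem.Int.toChars 5 ++ "d1m0z".toList, "grad".toList ++ PySem.Int.toChars 5 ++ "[2]".toList),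
  ("g".toList ++ PySem.Int.toChars 6 ++ "d1m0x".toList, "grad".toList ++ PySem.Int.toChars 6 ++ "[0]".toList),
  ("g".toList ++ PySem.Int.toChars 6 ++ "d1m0y".toList, "grad".toList ++ PySem.Int.toChars 6 ++ "[1]".toList),
  ("g".toList ++ PySem.Int.toChars 6 ++ "d1m0z".toList, "grad".toList ++ PySem.Int.toChars 6 ++ "[2]".toList),
  ("g".toList ++ PySem.Int.toChars 7 ++ "d1m0x".toList, "grad".toList ++ PySem.Int.toChars 7 ++ "[0]".toList),
  ("g".toList ++ PySem.Int.toChars 7 ++ "d1m0y".toList, "grad".toList ++ PySem.Int.toChars 7 ++ "[1]".toList),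
  ("g".toList ++ PySem.Int.toChars 7 ++ "d1m0z".toList, "grad".toList ++ PySem.Int.toChars 7 ++ "[2]".toList),
  ("g".toList ++ PySem.Int.toChars 8 ++ "d1m0x".toList, "grad".toList ++ PySem.Int.toChars 8 ++ "[0]".toList),
  ("g".toList ++ PySem.Int.toChars 8 ++ "d1m0y".toList, "grad".toList ++ PySem.Int.toChars 8 ++ "[1]".toList),
  ("g".toList ++ PySem.Int.toChars 8 ++ "d1m0z".toList, "grad".toList ++ PySem.Int.toChars 8 ++ "[2]".toList)]

def pvSUF : List (List Char) := ["x".toList, "y".toList, "z".toList, "0x".toList, "0y".toList, "0z".toList, "ax".toList, "ay".toList, "az".toList, "eax".toList, "eay".toList, "eaz".toList, "m0x".toList, "m0y".toList, "m0z".toList, "1eax".toList, "1eay".toList, "1eaz".toList, "1m0x".toList, "1m0y".toList, "1m0z".toList, "d1m0x".toList, "d1m0y".toList, "d1m0z".toList, "0d1m0x".toList, "0d1m0y".toList, "0d1m0z".toList, "1d1m0x".toList, "1d1m0y".toList, "1d1m0z".toList, "2d1m0x".toList, "2d1m0y".toList, "2d1m0z".toList, "3d1m0x".toList, "3d1m0y".toList,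 "3d1m0z".toList, "4d1m0x".toList, "4d1m0y".toList, "4d1m0z".toList, "5d1m0x".toList, "5d1m0y".toList, "5d1m0z".toList, "6d1m0x".toList, "6d1m0y".toList, "6d1m0z".toList, "7d1m0x".toList, "7d1m0y".toList, "7d1m0z".toList, "8d1m0x".toList, "8d1m0y".toList, "8d1m0z".toList]

-- static facts about the 36 tokens, their replacements and their suffixes (all checked by the kernel)
lemma pvFactClosed : pvClosed pvSUF = true := by decide
lemma pvFactAvoid : pvTBL.all (fun pq => pvAvoid pvSUF pq.2) = true := by decide
lemma pvFactTails : pvTBL.all (fun pq => !pq.1.isEmpty && pvSUF.contains pq.1.tail) = true := by decide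
lemma pvFactPairwise : List.Pairwise (fun a b => pvNoOccB a.1 b.1 = true) pvTBL := by decide
lemma pvFactRepNoOcc : pvTBL.all (fun pq => pvTBL.all (fun pq' => pvNoOccB pq.1 pq'.2)) = true := by decide
lemma pvFactUniq : pvTBL.all (fun a => pvTBL.all (fun b => (a.1 == b.1) || !(a.1.isPrefixOf b.1))) = true := by decide
lemma pvFactLen : pvTBL.all (fun pq => (pq.1.length == 2 || pq.1.length == 3 || pq.1.length == 5 || pq.1.length == 7) && !pq.2.isEmpty) = true := by decide

lemma pvChain_nil (L : List (List Char × List Char)) : pvChain L [] = [] := by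
  induction L with
  | nil => rfl
  | cons pq L ih => simpa [pvChain, pvR_nil] using ih

lemma pvChain_cons (c : Char) :
    ∀ (L : List (List Char × List Char)) (t : List Char), (∀ pq ∈ L, pq ∈ pvTBL) →
      (∀ pq ∈ L, ¬ pq.1 <+: c :: t) → pvChain L (c :: t) = c :: pvChain L t := by
  intro L
  induction L with
  | nil => intro t _ _; rfl
  | cons pq L ih =>
    intro t hsub h
    have hhead := h pq (by simp)
    have hmem := hsub pq (by simp)
    show pvChain L (pvR pq.1 pq.2 (c :: t)) = c :: pvChain L (pvR pq.1 pq.2 t)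
    rw [pvR_cons_neg _ _ _ _ hhead]
    have hpne : pq.1 ≠ [] := by
      have := (List.all_eq_true.mp pvFactTails) pq hmem
      simp only [Bool.and_eq_true, Bool.not_eq_true', List.isEmpty_eq_false_iff] at this
      exact this.1
    have hq : pvAvoid pvSUF pq.2 = true := (List.all_eq_true.mp pvFactAvoid) pq hmem
    apply ih
    · intro x hx; exact hsub x (List.mem_cons_of_mem _ hx)
    · intro x hx hpre
      have hxT := hsub x (List.mem_cons_of_mem _ hx)
      have htails := (List.all_eq_true.mp pvFactTails) x hxT
      simp only [Bool.and_eq_true, Bool.not_eq_true', List.isEmpty_eq_false_iff] at htails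
      obtain ⟨hne, htl⟩ := htails
      rcases List.prefix_cons_iff.mp hpre with h1 | ⟨t', ht', hpre'⟩
      · exact hne h1
      · have htl' : t' ∈ pvSUF := by
          have : x.1.tail = t' := by rw [ht']; rfl
          rw [this] at htl
          simpa using htl
        have hpt : t' <+: t :=
          pvTnc pvSUF pq.1 pq.2 hpne pvFactClosed hq t.length t le_rfl t' htl' hpre'
        exact h x (List.mem_cons_of_mem _ hx) (ht' ▸ List.cons_prefix_cons.mpr ⟨rfl, hpt⟩)

lemma pvChain_append_noOcc (x : List Char) :
    ∀ (L : List (List Char × List Char)) (w : List Char),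
      (∀ pq ∈ L, pvNoOccB pq.1 x = true) → pvChain L (x ++ w) = x ++ pvChain L w := by
  intro L
  induction L with
  | nil => intro w _; rfl
  | cons pq L ih =>
    intro w h
    show pvChain L (pvR pq.1 pq.2 (x ++ w)) = x ++ pvChain L (pvR pq.1 pq.2 w)
    rw [pvR_append pq.1 pq.2 x w (h pq (by simp))]
    exact ih _ (fun y hy => h y (List.mem_cons_of_mem _ hy))

lemma pvChain_match (p q : List Char) (hmem : (p, q) ∈ pvTBL) (t : List Char) :
    pvChain pvTBL (p ++ t) = q ++ pvChain pvTBL t := by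
  obtain ⟨L1, L2, hsplit⟩ := List.append_of_mem hmem
  have hsubL2 : ∀ y ∈ L2, y ∈ pvTBL := by
    intro y hy; rw [hsplit]; simp [hy]
  have hpw := pvFactPairwise
  rw [hsplit] at hpw
  have h1 : ∀ pq' ∈ L1, pvNoOccB pq'.1 p = true := by
    intro pq' h'
    have := (List.pairwise_append.mp hpw).2.2 pq' h' (p, q) (by simp)
    exact this
  have h2 : ∀ pq' ∈ L2, pvNoOccB pq'.1 q = true := by
    intro pq' h'
    have := (List.all_eq_true.mp pvFactRepNoOcc) pq' (hsubL2 pq' h')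
    exact (List.all_eq_true.mp this) (p, q) hmem
  have hpne : p ≠ [] := by
    have := (List.all_eq_true.mp pvFactTails) (p, q) hmem
    simp only [Bool.and_eq_true, Bool.not_eq_true', List.isEmpty_eq_false_iff] at this
    exact this.1
  have key : ∀ u, pvChain pvTBL u = pvChain L2 (pvR p q (pvChain L1 u)) := by
    intro u
    rw [hsplit]
    simp [pvChain, List.foldl_append]
  rw [key (p ++ t), key t]
  rw [pvChain_append_noOcc p L1 t h1]
  rw [pvR_pos p q _ hpne (List.prefix_append p _), List.drop_left]
  rw [pvChain_append_noOcc q L2 _ h2]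

-- ===== bridge: port A equals the chain =====
lemma pvRange09 : PySem.List.pyRange 0 9 1 = [0, 1, 2, 3, 4, 5, 6, 7, 8] := by decide

lemma A_eq_chain (s : String) : (use_vectors s).toList = pvChain pvTBL s.toList := by
  simp [use_vectors, pvFmtA, pvRange09, PySem.Str.toList_replace, String.toList_ofList,
    replace_eq_pvR, pvChain, pvTBL, List.foldl]

-- ===== port-B side =====
-- the table's items, and the char-level view of a lookup
lemma pvTable_items :
    pvTable.items = pvTBL.map (fun pq => (String.ofList pq.1, String.ofList pq.2)) := by decide

lemma pvBeq_ofList (a u : List Char) :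
    (String.ofList a == String.ofList u) = (a == u) := by
  by_cases h : a = u
  · simp [h]
  · have h2 : String.ofList a ≠ String.ofList u := by
      intro hh
      exact h (by rw [← String.toList_ofList (l := a), hh, String.toList_ofList])
    simp [h, h2]

lemma pvFind_map (u : List Char) :
    ∀ (l : List (List Char × List Char)),
      Option.map Prod.snd
          (List.find? (fun p => p.1 == String.ofList u)
            (l.map (fun pq => (String.ofList pq.1, String.ofList pq.2)))) =
        Option.map (fun pq => String.ofList pq.2) (l.find? (fun pq => pq.1 == u)) := by
  intro l
  induction l with
  | nil => rfl
  | cons a l ih =>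
    simp only [List.map_cons, List.find?_cons]
    rw [pvBeq_ofList a.1 u]
    by_cases h : (a.1 == u) = true
    · simp [h]
    · simp only [Bool.not_eq_true] at h
      simp only [h]
      simpa using ih

lemma pvGet_char (u : List Char) :
    pvTable.get? (String.ofList u) =
      Option.map (fun pq => String.ofList pq.2) (pvTBL.find? (fun pq => pq.1 == u)) := by
  rw [PySem.Dict.get?, pvTable_items, pvFind_map]

lemma pvScan_nil (f : Nat) : pvScan f [] = [] := by cases f <;> rfl

lemma pvScan_succ (f : Nat) (c : Char) (t : List Char) :
    pvScan (f + 1) (c :: t) =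
      ((pvHit (c :: t)).getD (String.ofList ((c :: t).take 1), 1)).1 ::
        pvScan f ((c :: t).drop ((pvHit (c :: t)).getD (String.ofList ((c :: t).take 1), 1)).2) := rfl

lemma pvHit_bound (c : Char) (t : List Char) :
    1 ≤ ((pvHit (c :: t)).getD (String.ofList ((c :: t).take 1), 1)).2 := by
  simp only [pvHit]
  cases pvTable.get? (String.ofList ((c :: t).take 7)) <;>
    cases pvTable.get? (String.ofList ((c :: t).take 5)) <;>
      cases pvTable.get? (String.ofList ((c :: t).take 3)) <;>
        cases pvTable.get? (String.ofList ((c :: t).take 2)) <;>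
          simp [Option.orElse]

lemma pvScan_fuel : ∀ (n : Nat) (cs : List Char) (f : Nat), cs.length ≤ n → cs.length ≤ f →
    pvScan f cs = pvScan cs.length cs := by
  intro n
  induction n with
  | zero =>
    intro cs f h1 _
    have : cs = [] := List.eq_nil_of_length_eq_zero (Nat.le_zero.mp h1)
    subst this
    simp [pvScan_nil]
  | succ n ih =>
    intro cs f h1 h2
    cases cs with
    | nil => simp [pvScan_nil]
    | cons c t =>
      simp only [List.length_cons] at h1 h2
      obtain ⟨f', rfl⟩ : ∃ f', f = f' + 1 := ⟨f - 1, by omega⟩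
      conv_rhs => rw [List.length_cons]
      rw [pvScan_succ, pvScan_succ]
      have hL := pvHit_bound c t
      have hd : ((c :: t).drop ((pvHit (c :: t)).getD (String.ofList ((c :: t).take 1), 1)).2).length ≤ t.length := by
        rw [List.length_drop]; simp only [List.length_cons]; omega
      have hn : t.length ≤ n := by omega
      have hf : t.length ≤ f' := by omega
      rw [ih _ f' (hd.trans hn) (hd.trans hf), ih _ t.length (hd.trans hn) hd]

-- B output on chars
def pvOut (cs : List Char) : List Char := ((pvScan cs.length cs).map String.toList).flatten

lemma pvFind_none (cs : List Char) (hno : ∀ pq ∈ pvTBL, ¬ pq.1 <+: cs) (L : Nat) :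
    pvTBL.find? (fun pq => pq.1 == cs.take L) = none := by
  rw [List.find?_eq_none]
  intro x hx
  simp only [beq_iff_eq]
  intro heq
  exact hno x hx (heq ▸ List.take_prefix L cs)

lemma pvKeysNodup : (pvTBL.map Prod.fst).Nodup := by decide

lemma pvFind_self_gen (p : List Char) (q : List Char) :
    ∀ (l : List (List Char × List Char)), (l.map Prod.fst).Nodup → (p, q) ∈ l →
      l.find? (fun pq => pq.1 == p) = some (p, q) := by
  intro l
  induction l with
  | nil => intro _ h; simp at h
  | cons a l ih =>
    intro hnd hm
    rcases List.mem_cons.mp hm with rfl | hm'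
    · simp
    · have hnd' := hnd
      simp only [List.map_cons, List.nodup_cons] at hnd'
      have hne : (a.1 == p) = false := by
        simp only [beq_eq_false_iff_ne, ne_eq]
        intro heq
        exact hnd'.1 (heq ▸ List.mem_map_of_mem hm')
      simp only [List.find?_cons, hne]
      exact ih hnd'.2 hm'

lemma pvFind_self (p q : List Char) (hmem : (p, q) ∈ pvTBL) :
    pvTBL.find? (fun pq => pq.1 == p) = some (p, q) :=
  pvFind_self_gen p q pvTBL pvKeysNodup hmem

lemma pvOut_nil : pvOut [] = [] := by simp [pvOut, pvScan_nil]

lemma pvHit_none (cs : List Char) (hno : ∀ pq ∈ pvTBL, ¬ pq.1 <+: cs) : pvHit cs = none := by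
  simp [pvHit, pvGet_char, pvFind_none cs hno, Option.orElse]

lemma pvOut_miss (c : Char) (t : List Char) (hno : ∀ pq ∈ pvTBL, ¬ pq.1 <+: c :: t) :
    pvOut (c :: t) = c :: pvOut t := by
  unfold pvOut
  conv_lhs => rw [List.length_cons, pvScan_succ, pvHit_none _ hno]
  simp [String.toList_ofList]

lemma pvPrefix_uniq (cs : List Char) (x y : List Char × List Char)
    (hx : x ∈ pvTBL) (hy : y ∈ pvTBL) (h1 : x.1 <+: cs) (h2 : y.1 <+: cs) : x.1 = y.1 := by
  by_cases heq : x.1 = y.1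
  · exact heq
  · exfalso
    have fx := (List.all_eq_true.mp ((List.all_eq_true.mp pvFactUniq) x hx)) y hy
    have fy := (List.all_eq_true.mp ((List.all_eq_true.mp pvFactUniq) y hy)) x hx
    simp only [Bool.or_eq_true, beq_iff_eq, Bool.not_eq_true'] at fx fy
    rcases List.prefix_or_prefix_of_prefix h1 h2 with hpre | hpre
    · rcases fx with h | h
      · exact heq h
      · have : ¬ (x.1 <+: y.1) := by rw [← List.isPrefixOf_iff_prefix]; simp [h]
        exact this hpre
    · rcases fy with h | h
      · exact heq h.symm
      · have : ¬ (y.1 <+: x.1) := by rw [← List.isPrefixOf_iff_prefix]; simp [h]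
        exact this hpre

lemma pvGetNone2 (cs p q : List Char) (L : Nat) (hm : (p, q) ∈ pvTBL) (hp : p <+: cs)
    (h1 : p.length < cs.length) (h2 : p.length < L) :
    pvTable.get? (String.ofList (cs.take L)) = none := by
  rw [pvGet_char]
  have hfind : pvTBL.find? (fun pq => pq.1 == cs.take L) = none := by
    rw [List.find?_eq_none]
    intro x hx
    simp only [beq_iff_eq]
    intro heq
    have hxp : x.1 <+: cs := heq ▸ List.take_prefix L cs
    have hxy := pvPrefix_uniq cs x (p, q) hx hm hxp hp
    have hlen : x.1.length = min L cs.length := by rw [heq, List.length_take]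
    rw [hxy] at hlen
    simp only at hlen
    omega
  rw [hfind]
  rfl

lemma pvGetSome (cs p q : List Char) (hm : (p, q) ∈ pvTBL) (hp : p <+: cs) :
    pvTable.get? (String.ofList (cs.take p.length)) = some (String.ofList q) := by
  have h : cs.take p.length = p := (List.prefix_iff_eq_take.mp hp).symm
  rw [h, pvGet_char, pvFind_self p q hm]
  rfl

lemma pvHit_eqn (s : List Char) :
    pvHit s =
      ((pvTable.get? (String.ofList (s.take 7))).map (fun rep => (rep, 7))).orElse (fun _ =>
      ((pvTable.get? (String.ofList (s.take 5))).map (fun rep => (rep, 5))).orElse (fun _ =>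
      ((pvTable.get? (String.ofList (s.take 3))).map (fun rep => (rep, 3))).orElse (fun _ =>
      (pvTable.get? (String.ofList (s.take 2))).map (fun rep => (rep, 2))))) := rfl

lemma pvHit_hit (cs p q : List Char) (hm : (p, q) ∈ pvTBL) (hp : p <+: cs)
    (hlt : p.length < cs.length) : pvHit cs = some (String.ofList q, p.length) := by
  have hlen := (List.all_eq_true.mp pvFactLen) (p, q) hm
  simp only [Bool.and_eq_true, Bool.or_eq_true, beq_iff_eq] at hlen
  rw [pvHit_eqn]
  obtain ⟨hlen1, -⟩ := hlen
  rcases hlen1 with ((h | h) | h) | h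
  · rw [pvGetNone2 cs p q 7 hm hp hlt (by omega), pvGetNone2 cs p q 5 hm hp hlt (by omega),
      pvGetNone2 cs p q 3 hm hp hlt (by omega)]
    rw [show (2 : Nat) = p.length from h.symm, pvGetSome cs p q hm hp]
    simp [Option.orElse]
  · rw [pvGetNone2 cs p q 7 hm hp hlt (by omega), pvGetNone2 cs p q 5 hm hp hlt (by omega)]
    rw [show (3 : Nat) = p.length from h.symm, pvGetSome cs p q hm hp]
    simp [Option.orElse]
  · rw [pvGetNone2 cs p q 7 hm hp hlt (by omega)]
    rw [show (5 : Nat) = p.length from h.symm, pvGetSome cs p q hm hp]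
    simp [Option.orElse]
  · rw [show (7 : Nat) = p.length from h.symm, pvGetSome cs p q hm hp]
    simp [Option.orElse]

set_option maxRecDepth 100000 in
lemma pvFactScan : pvTBL.all (fun pq => pvScan pq.1.length pq.1 == [String.ofList pq.2]) = true := by decide

lemma pvOut_hit (p q : List Char) (hmem : (p, q) ∈ pvTBL) (cs : List Char) (hp : p <+: cs) :
    pvOut cs = q ++ pvOut (cs.drop p.length) := by
  have hple : p.length ≤ cs.length := hp.length_le
  by_cases hcase : p.length = cs.length
  · have hcs : p = cs := List.IsPrefix.eq_of_length hp hcase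
    subst hcs
    have hscan := (List.all_eq_true.mp pvFactScan) (p, q) hmem
    simp only [beq_iff_eq] at hscan
    have hdrop : p.drop p.length = [] := by simp
    rw [hdrop, pvOut_nil]
    unfold pvOut
    rw [hscan]
    simp [String.toList_ofList]
  · have hlt : p.length < cs.length := by omega
    obtain ⟨c, t, rfl⟩ : ∃ c t, cs = c :: t := by
      cases cs with
      | nil => exact absurd hlt (by simp)
      | cons c t => exact ⟨c, t, rfl⟩
    unfold pvOut
    conv_lhs => rw [List.length_cons, pvScan_succ, pvHit_hit (c :: t) p q hmem hp hlt]
    simp only [Option.getD_some, String.toList_ofList, List.map_cons, List.flatten_cons]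
    congr 1
    have hlen2 := (List.all_eq_true.mp pvFactLen) (p, q) hmem
    simp only [Bool.and_eq_true, Bool.or_eq_true, beq_iff_eq] at hlen2
    have hp1 : 1 ≤ p.length := by rcases hlen2.1 with ((h | h) | h) | h <;> omega
    have hct : (c :: t).length = t.length + 1 := rfl
    rw [pvScan_fuel ((c :: t).drop p.length).length _ t.length le_rfl
      (by rw [List.length_drop, hct]; omega)]

-- ===== main equivalence on chars =====
lemma pvMain : ∀ (n : Nat) (cs : List Char), cs.length ≤ n → pvChain pvTBL cs = pvOut cs := by
  intro n
  induction n with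
  | zero =>
    intro cs h
    have : cs = [] := List.eq_nil_of_length_eq_zero (Nat.le_zero.mp h)
    subst this
    rw [pvChain_nil, pvOut_nil]
  | succ n ih =>
    intro cs hcs
    by_cases hex : ∃ pq ∈ pvTBL, pq.1 <+: cs
    · obtain ⟨⟨p, q⟩, hm, hp⟩ := hex
      have hpne : p ≠ [] := by
        have := (List.all_eq_true.mp pvFactTails) (p, q) hm
        simp only [Bool.and_eq_true, Bool.not_eq_true', List.isEmpty_eq_false_iff] at this
        exact this.1
      have hplen : 0 < p.length := List.length_pos_iff.mpr hpne
      have hp' : p <+: cs := hp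
      have key : pvChain pvTBL (p ++ cs.drop p.length) = q ++ pvChain pvTBL (cs.drop p.length) :=
        pvChain_match p q hm (cs.drop p.length)
      have hlen' : p.length ≤ cs.length := hp'.length_le
      conv_lhs => rw [show cs = p ++ cs.drop p.length from (List.prefix_append_drop hp')]
      rw [key, pvOut_hit p q hm cs hp',
        ih (cs.drop p.length) (by rw [List.length_drop]; omega)]
    · push Not at hex
      cases cs with
      | nil => rw [pvChain_nil, pvOut_nil]
      | cons c t =>
        rw [pvChain_cons c pvTBL t (fun _ h => h) (fun pq h => hex pq h),
          pvOut_miss c t (fun pq h => hex pq h), ih t (by simp at hcs; omega)]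

lemma pvInterNil : ∀ (l : List (List Char)), List.intercalate ([] : List Char) l = l.flatten := by
  intro l
  induction l with
  | nil => rfl
  | cons a t ih =>
    cases t with
    | nil => simp [List.intercalate]
    | cons b t2 =>
      simp only [List.intercalate] at ih ⊢
      rw [List.intersperse_cons₂]
      simpa using ih

lemma B_eq_out (s : String) : (use_vectors_alt s).toList = pvOut s.toList := by
  unfold use_vectors_alt pvOut
  rw [PySem.Str.toList_join]
  have : ("" : String).toList = [] := rfl
  rw [this]
  exact pvInterNil _

-- ===== VERDICT (by name: the statement is the Claim_ definition above) =====
theorem use_vectors_spec : Claim_equal_use_vectors := by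
  unfold Claim_equal_use_vectors
  intro s _
  unfold Spec_use_vectors
  apply String.toList_inj.mp
  rw [A_eq_chain, B_eq_out, pvMain s.toList.length s.toList le_rfl]
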